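-- pv_equiv track=rewrite | github.com/nikdimentiy/mint | CodeSignal/first_operation_character.py | solution
-- ===== SOURCE A (Python) =====
-- def solution(expr: str) -> int:
--     """
--     Finds the index of the operator in a valid arithmetic expression that needs to be computed first.
--
--     The function evaluates the expression to determine the operator with the highest priority
--     that is not enclosed in parentheses. If multiple operators have the same highest priority,
--     the function returns the index of the leftmost one.
--
--     Args:
--     - expr (str): A string representing a valid arithmetic expression consisting of digits, parentheses,
--                   addition ('+') and multiplication ('*') signs. It is guaranteed that there is at least
--                   one operator in it.
--
--     Returns:
--     - int: The index of the operator in the expression that needs to be computed first. If multiple operators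
--            have the same highest priority, the function returns the index of the leftmost one.
--
--     Example:
--     >>> solution("3 + 5 * (2 + 8)")
--     4
--     >>> solution("(1 + 2) * 3 + 4")
--     1
--     >>> solution("5 * (6 + 2) + 3")
--     0
--     """
--     lvl = 0
--     lvl_char = {}
--     priority = {'+': 1, '*': 2}
--
--     for i, char in enumerate(expr):
--         if char == '(':
--             lvl += 1
--         elif char == ')':
--             lvl -= 1
--         elif char in priority:
--             if lvl not in lvl_char:
--                 lvl_char[lvl] = (char, i)
--             else:
--                 if priority[char] > priority[lvl_char[lvl][0]]:
--                     lvl_char[lvl] = (char, i)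
--
--     return lvl_char[max(lvl_char.keys())][1]
-- ===== SOURCE B (Python) =====
-- def solution(expr: str) -> int:
--     # Pass 1: lexicographic running max of (paren depth, operator priority)
--     # over all operator occurrences.
--     depth = 0
--     best = None
--     for ch in expr:
--         if ch == '(':
--             depth += 1
--         elif ch == ')':
--             depth -= 1
--         elif ch == '+' or ch == '*':
--             key = (depth, 2 if ch == '*' else 1)
--             if best is None or key > best:
--                 best = key
--     # Pass 2: index of the first operator whose (depth, priority) equals best.
--     depth = 0
--     for i, ch in enumerate(expr):
--         if ch == '(':
--             depth += 1
--         elif ch == ')':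
--             depth -= 1
--         elif (ch == '+' or ch == '*') and (depth, 2 if ch == '*' else 1) == best:
--             return i
--     raise ValueError("expression contains no operator")
-- ===== Notes on version B (the rewrite author's own statement) =====
-- stated objective: alternative
-- what changed: A maintains a per-depth dict of best operators in one pass and then takes the max key; B is a two-pass scan: pass 1 keeps a running lexicographic maximum of (paren depth, operator priority) over operator occurrences, pass 2 returns the index of the first operator matching that maximum, with no dict at all.
import Mathlib
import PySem

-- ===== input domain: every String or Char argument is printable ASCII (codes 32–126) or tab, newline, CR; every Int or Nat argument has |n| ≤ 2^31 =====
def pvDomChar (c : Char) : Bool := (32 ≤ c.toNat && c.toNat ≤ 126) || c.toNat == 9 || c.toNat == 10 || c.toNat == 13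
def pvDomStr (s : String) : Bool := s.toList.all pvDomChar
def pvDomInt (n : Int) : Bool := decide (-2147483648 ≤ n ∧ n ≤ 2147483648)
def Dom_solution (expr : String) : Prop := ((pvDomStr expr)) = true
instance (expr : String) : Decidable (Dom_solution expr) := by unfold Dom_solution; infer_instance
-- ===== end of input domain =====

-- B replaces A's per-depth dict + max-key extraction by two plain scans (a running lexicographic
-- maximum of (depth, priority) over operators, then the first matching index); same O(n) cost, no dict.

-- ===== PORT A =====
-- priority[c] for c ∈ {'+','*'} (A's two-entry dict 'priority')
def prioA (c : Char) : Int := if c = '*' then 2 else 1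

-- the body of A's for-loop: state = (lvl, lvl_char)
def aStep (st : Int × PySem.Dict Int (Char × Int)) (p : Int × Char) : Int × PySem.Dict Int (Char × Int) :=
  if p.2 = '(' then (st.1 + 1, st.2)
  else if p.2 = ')' then (st.1 - 1, st.2)
  else if p.2 = '+' ∨ p.2 = '*' then
    match st.2.get? st.1 with
    | none => (st.1, st.2.insert st.1 (p.2, p.1))
    | some cv => if prioA p.2 > prioA cv.1 then (st.1, st.2.insert st.1 (p.2, p.1)) else st
  else st

def solution (expr : String) : Int :=
  let st := (PySem.List.enumerate expr.toList).foldl aStep (0, PySem.Dict.empty)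
  match PySem.List.max? st.2.keys (fun k => k) with
  | none => 0   -- Python raises ValueError here (no operator in expr): outside Pre_solution
  | some m => (st.2.getD m ('+', 0)).2

-- ===== PORT B =====
-- pass 1 of Source B: running lexicographic max of (depth, priority) over operators
def bestPass : List Char → Int → Option (Int × Int) → Option (Int × Int)
  | [], _, best => best
  | c :: cs, depth, best =>
    if c = '(' then bestPass cs (depth + 1) best
    else if c = ')' then bestPass cs (depth - 1) best
    else if c = '+' ∨ c = '*' then
      let key : Int × Int := (depth, if c = '*' then 2 else 1)
      bestPass cs depth
        (match best with
         | none => some key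
         | some b => if b.1 < key.1 ∨ (b.1 = key.1 ∧ b.2 < key.2) then some key else some b)
    else bestPass cs depth best

-- pass 2 of Source B: first operator index whose (depth, priority) equals best
def findPass : List (Int × Char) → Int → Option (Int × Int) → Option Int
  | [], _, _ => none
  | (i, c) :: ps, depth, best =>
    if c = '(' then findPass ps (depth + 1) best
    else if c = ')' then findPass ps (depth - 1) best
    else if (c = '+' ∨ c = '*') ∧ some (depth, if c = '*' then (2 : Int) else 1) = best then some i
    else findPass ps depth best

def solution_alt (expr : String) : Int :=
  let best := bestPass expr.toList 0 none
  match findPass (PySem.List.enumerate expr.toList) 0 best with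
  | some i => i
  | none => 0   -- Source B raises ValueError here (no operator in expr): outside Pre_solution

-- ===== PRECONDITION & SPEC =====
-- Pre_ excludes exactly the inputs with no operator character, on which A raises ValueError
-- (max() of the empty dict-keys view) and Source B raises ValueError too.
def Pre_solution (expr : String) : Prop := '+' ∈ expr.toList ∨ '*' ∈ expr.toList
instance (expr : String) : Decidable (Pre_solution expr) := by unfold Pre_solution; infer_instance

def pvWitness_solution : String := "3 + 5 * (2 + 8)"

def Spec_solution (expr : String) (out : Int) : Prop := out = solution_alt expr
instance (expr : String) (out : Int) : Decidable (Spec_solution expr out) := by unfold Spec_solution; infer_instance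

-- ===== CLAIM (what is proved, stated in full; the proofs are below) =====
def Claim_equal_solution : Prop := ∀ (expr : String), Dom_solution expr → Pre_solution expr → Spec_solution expr (solution expr)

-- ===== LEMMAS AND PROOFS =====

-- the stream of operator occurrences (level, char, index) of an enumerated character list
def ops : List (Int × Char) → Int → List (Int × Char × Int)
  | [], _ => []
  | (i, c) :: ps, lvl =>
    if c = '(' then ops ps (lvl + 1)
    else if c = ')' then ops ps (lvl - 1)
    else if c = '+' ∨ c = '*' then (lvl, c, i) :: ops ps lvl
    else ops ps lvl

-- what A's dict stores at level l, replayed over the ops stream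
def sel : List (Int × Char × Int) → Int → Option (Char × Int) → Option (Char × Int)
  | [], _, acc => acc
  | (lv, c, i) :: rest, l, acc =>
    if lv = l then
      sel rest l
        (match acc with
         | none => some (c, i)
         | some ci => if prioA c > prioA ci.1 then some (c, i) else some ci)
    else sel rest l acc

-- B's pass 1 replayed over the ops stream
def bests : List (Int × Char × Int) → Option (Int × Int) → Option (Int × Int)
  | [], b => b
  | (lv, c, _) :: rest, b =>
    bests rest
      (match b with
       | none => some (lv, prioA c)
       | some q => if q.1 < lv ∨ (q.1 = lv ∧ q.2 < prioA c) then some (lv, prioA c) else some q)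

-- B's pass 2 replayed over the ops stream
def find1 : List (Int × Char × Int) → Option (Int × Int) → Option Int
  | [], _ => none
  | (lv, c, i) :: rest, b => if some (lv, prioA c) = b then some i else find1 rest b

theorem foldA_get? (ps : List (Int × Char)) (lvl : Int) (d : PySem.Dict Int (Char × Int)) (l : Int) :
    ((ps.foldl aStep (lvl, d)).2).get? l = sel (ops ps lvl) l (d.get? l) := by
  induction ps generalizing lvl d with
  | nil => simp [ops, sel]
  | cons hd tl ih =>
    obtain ⟨i, c⟩ := hd
    simp only [List.foldl_cons]
    by_cases h1 : c = '('
    · simp [aStep, ops, h1, ih]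
    · by_cases h2 : c = ')'
      · simp [aStep, ops, h2, ih]
      · by_cases h3 : c = '+' ∨ c = '*'
        · have hops : ops ((i, c) :: tl) lvl = (lvl, c, i) :: ops tl lvl := by
            simp [ops, h1, h2, h3]
          rcases hget : d.get? lvl with _ | cv
          · have : aStep (lvl, d) (i, c) = (lvl, d.insert lvl (c, i)) := by
              simp [aStep, h1, h2, h3, hget]
            rw [this, ih, hops]
            by_cases hl : lvl = l
            · subst hl
              simp [sel, hget]
            · simp [sel, PySem.Dict.get?_insert, hl, (show ¬ l = lvl from fun h => hl h.symm)]
          · by_cases hp : prioA c > prioA cv.1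
            · have : aStep (lvl, d) (i, c) = (lvl, d.insert lvl (c, i)) := by
                simp [aStep, h1, h2, h3, hget, hp]
              rw [this, ih, hops]
              by_cases hl : lvl = l
              · subst hl
                simp [sel, hget, hp]
              · simp [sel, PySem.Dict.get?_insert, hl, (show ¬ l = lvl from fun h => hl h.symm)]
            · have : aStep (lvl, d) (i, c) = (lvl, d) := by
                simp [aStep, h1, h2, h3, hget, hp]
              rw [this, ih, hops]
              by_cases hl : lvl = l
              · subst hl
                simp [sel, hget, hp]
              · simp [sel, hl]
        · simp [aStep, ops, h1, h2, h3, ih]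

theorem foldA_mem_keys (ps : List (Int × Char)) (lvl : Int) (d : PySem.Dict Int (Char × Int)) (l : Int) :
    l ∈ ((ps.foldl aStep (lvl, d)).2).keys ↔ l ∈ d.keys ∨ l ∈ (ops ps lvl).map (·.1) := by
  induction ps generalizing lvl d with
  | nil => simp [ops]
  | cons hd tl ih =>
    obtain ⟨i, c⟩ := hd
    simp only [List.foldl_cons]
    by_cases h1 : c = '('
    · simp [aStep, ops, h1, ih]
    · by_cases h2 : c = ')'
      · simp [aStep, ops, h2, ih]
      · by_cases h3 : c = '+' ∨ c = '*'
        · have hops : ops ((i, c) :: tl) lvl = (lvl, c, i) :: ops tl lvl := by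
            simp [ops, h1, h2, h3]
          rw [hops]
          rcases hget : d.get? lvl with _ | cv
          · have hstep : aStep (lvl, d) (i, c) = (lvl, d.insert lvl (c, i)) := by
              simp [aStep, h1, h2, h3, hget]
            rw [hstep, ih]
            simp only [List.map_cons, List.mem_cons, PySem.Dict.mem_keys_insert]
            tauto
          · have hmem : lvl ∈ d.keys := by
              by_contra hno
              have hn := (PySem.Dict.get?_eq_none_iff_not_mem_keys d lvl).mpr hno
              rw [hn] at hget
              exact absurd hget (by simp)
            by_cases hp : prioA c > prioA cv.1
            · have hstep : aStep (lvl, d) (i, c) = (lvl, d.insert lvl (c, i)) := by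
                simp [aStep, h1, h2, h3, hget, hp]
              rw [hstep, ih]
              simp only [List.map_cons, List.mem_cons, PySem.Dict.mem_keys_insert]
              constructor
              · rintro (h | h) <;> tauto
              · rintro (h | (rfl | h)) <;> tauto
            · have hstep : aStep (lvl, d) (i, c) = (lvl, d) := by
                simp [aStep, h1, h2, h3, hget, hp]
              rw [hstep, ih]
              simp only [List.map_cons, List.mem_cons]
              constructor
              · rintro (h | h) <;> tauto
              · rintro (h | (rfl | h)) <;> tauto
        · simp [aStep, ops, h1, h2, h3, ih]

theorem bestPass_eq_bests (ps : List (Int × Char)) (lvl : Int) (b : Option (Int × Int)) :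
    bestPass (ps.map (·.2)) lvl b = bests (ops ps lvl) b := by
  induction ps generalizing lvl b with
  | nil => simp [bestPass, ops, bests]
  | cons hd tl ih =>
    obtain ⟨i, c⟩ := hd
    by_cases h1 : c = '('
    · simp [bestPass, ops, h1, ih]
    · by_cases h2 : c = ')'
      · simp [bestPass, ops, h2, ih]
      · by_cases h3 : c = '+' ∨ c = '*'
        · simp only [List.map_cons, bestPass, ops, h1, h2, h3]
          exact ih lvl _
        · simp [bestPass, ops, h1, h2, h3, ih]

theorem findPass_eq_find1 (ps : List (Int × Char)) (lvl : Int) (b : Option (Int × Int)) :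
    findPass ps lvl b = find1 (ops ps lvl) b := by
  induction ps generalizing lvl b with
  | nil => simp [findPass, ops, find1]
  | cons hd tl ih =>
    obtain ⟨i, c⟩ := hd
    by_cases h1 : c = '('
    · simp [findPass, ops, h1, ih]
    · by_cases h2 : c = ')'
      · simp [findPass, ops, h2, ih]
      · by_cases h3 : c = '+' ∨ c = '*'
        · by_cases h4 : some (lvl, if c = '*' then (2 : Int) else 1) = b
          · simp [findPass, ops, find1, h1, h2, h3, h4, prioA]
          · simp [findPass, ops, find1, h1, h2, h3, h4, prioA, ih]
        · simp [findPass, ops, h1, h2, h3, ih]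

theorem ops_ne_nil (ps : List (Int × Char)) (lvl : Int) (c : Char) (hc : c = '+' ∨ c = '*')
    (hmem : c ∈ ps.map (·.2)) : ops ps lvl ≠ [] := by
  induction ps generalizing lvl with
  | nil => simp at hmem
  | cons hd tl ih =>
    obtain ⟨i, cc⟩ := hd
    by_cases h3 : cc = '+' ∨ cc = '*'
    · have h1 : cc ≠ '(' := by rcases h3 with rfl | rfl <;> decide
      have h2 : cc ≠ ')' := by rcases h3 with rfl | rfl <;> decide
      simp [ops, h1, h2, h3]
    · have htl : c ∈ tl.map (·.2) := by
        rcases (by simpa using hmem) with h | h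
        · exact absurd hc (h ▸ h3)
        · simpa using h
      by_cases h1 : cc = '('
      · simpa [ops, h1] using ih _ htl
      · by_cases h2 : cc = ')'
        · simpa [ops, h1, h2] using ih _ htl
        · simpa [ops, h1, h2, h3] using ih _ htl

theorem bests_spec (L : List (Int × Char × Int)) (b : Option (Int × Int)) (p : Int × Int)
    (h : bests L b = some p) :
    ((∃ e ∈ L, (e.1, prioA e.2.1) = p) ∨ b = some p) ∧
      (∀ e ∈ L, e.1 < p.1 ∨ (e.1 = p.1 ∧ prioA e.2.1 ≤ p.2)) ∧
      (∀ q, b = some q → q.1 < p.1 ∨ (q.1 = p.1 ∧ q.2 ≤ p.2)) := by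
  induction L generalizing b with
  | nil =>
    simp only [bests] at h
    subst h
    refine ⟨Or.inr rfl, by simp, ?_⟩
    rintro q hq
    injection hq with hq
    subst hq
    exact Or.inr ⟨rfl, le_refl _⟩
  | cons e rest ih =>
    obtain ⟨lv, c, i⟩ := e
    simp only [bests] at h
    -- b' is the updated accumulator; in every case (lv, prioA c) ≤lex (value of b') and
    -- b' is either the key or the old b
    have main : ∀ (b' : Option (Int × Int)),
        bests rest b' = some p →
        (b' = some (lv, prioA c) ∨ b' = b) →
        (∀ q q', b' = some q' → b = some q → q.1 < q'.1 ∨ (q.1 = q'.1 ∧ q.2 ≤ q'.2)) →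
        (∀ q', b' = some q' → lv < q'.1 ∨ (lv = q'.1 ∧ prioA c ≤ q'.2)) →
        (∃ q', b' = some q') →
        ((∃ e ∈ (lv, c, i) :: rest, (e.1, prioA e.2.1) = p) ∨ b = some p) ∧
          (∀ e ∈ (lv, c, i) :: rest, e.1 < p.1 ∨ (e.1 = p.1 ∧ prioA e.2.1 ≤ p.2)) ∧
          (∀ q, b = some q → q.1 < p.1 ∨ (q.1 = p.1 ∧ q.2 ≤ p.2)) := by
      intro b' hrec hor hbb hkey hsome
      obtain ⟨hmem, hub, hacc⟩ := ih b' hrec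
      have hbp : ∀ q, b' = some q → q.1 < p.1 ∨ (q.1 = p.1 ∧ q.2 ≤ p.2) := hacc
      refine ⟨?_, ?_, ?_⟩
      · rcases hmem with hm | hm
        · obtain ⟨e, he, hpe⟩ := hm
          exact Or.inl ⟨e, List.mem_cons_of_mem _ he, hpe⟩
        · rcases hor with rfl | rfl
          · injection hm with hm2
            exact Or.inl ⟨(lv, c, i), List.mem_cons_self, hm2⟩
          · exact Or.inr hm
      · intro e he
        rcases List.mem_cons.mp he with rfl | hr
        · -- need (lv, prioA c) ≤lex p: via b'
          rcases hb' : b' with _ | q'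
          · obtain ⟨q', hq'⟩ := hsome
            rw [hb'] at hq'
            exact absurd hq' (by simp)
          · have h1 := hkey q' hb'
            have h2 := hbp q' hb'
            simp only
            rcases h1 with h1 | ⟨h1a, h1b⟩ <;> rcases h2 with h2 | ⟨h2a, h2b⟩
            · left; omega
            · left; omega
            · left; omega
            · right; exact ⟨by omega, by omega⟩
        · exact hub e hr
      · intro q hq
        rcases hb' : b' with _ | q'
        · obtain ⟨q', hq'⟩ := hsome
          rw [hb'] at hq'
          exact absurd hq' (by simp)
        · have h2 := hbp q' hb'
          have h3 := hbb q q' hb' hq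
          rcases h2 with h2 | ⟨h2a, h2b⟩ <;> rcases h3 with h3 | ⟨h3a, h3b⟩
          · left; omega
          · left; omega
          · left; omega
          · right; exact ⟨by omega, by omega⟩
    rcases b with _ | q
    · exact main (some (lv, prioA c)) h (Or.inl rfl)
        (by rintro q q' _ hq; exact absurd hq (by simp))
        (by rintro q' hq'; injection hq' with hq'; subst hq'; exact Or.inr ⟨rfl, le_refl _⟩)
        ⟨_, rfl⟩
    · dsimp only at h
      by_cases hgt : q.1 < lv ∨ (q.1 = lv ∧ q.2 < prioA c)
      · rw [if_pos hgt] at h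
        exact main (some (lv, prioA c)) h (Or.inl rfl)
          (by rintro q2 q' hq' hq2
              injection hq' with hq'; subst hq'
              injection hq2 with hq2; subst hq2
              rcases hgt with h' | ⟨h'a, h'b⟩
              · exact Or.inl h'
              · exact Or.inr ⟨h'a, le_of_lt h'b⟩)
          (by rintro q' hq'; injection hq' with hq'; subst hq'; exact Or.inr ⟨rfl, le_refl _⟩)
          ⟨_, rfl⟩
      · rw [if_neg hgt] at h
        push_neg at hgt
        exact main (some q) h (Or.inr rfl)
          (by rintro q2 q' hq' hq2
              injection hq' with hq'; subst hq'
              injection hq2 with hq2; subst hq2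
              exact Or.inr ⟨rfl, le_refl _⟩)
          (by rintro q' hq'
              injection hq' with hq'
              subst hq'
              rcases lt_trichotomy lv q.1 with h' | h' | h'
              · exact Or.inl h'
              · exact Or.inr ⟨h', hgt.2 h'.symm⟩
              · exact absurd h' (not_lt.mpr hgt.1))
          ⟨_, rfl⟩

theorem bests_some (L : List (Int × Char × Int)) (q : Int × Int) :
    ∃ p, bests L (some q) = some p := by
  induction L generalizing q with
  | nil => exact ⟨q, rfl⟩
  | cons e rest ih =>
    obtain ⟨lv, c, i⟩ := e
    simp only [bests]
    split_ifs <;> exact ih _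

theorem bests_isSome (L : List (Int × Char × Int)) (hL : L ≠ []) :
    ∃ p, bests L none = some p := by
  rcases L with _ | ⟨⟨lv, c, i⟩, rest⟩
  · exact absurd rfl hL
  · simpa only [bests] using bests_some rest (lv, prioA c)

theorem sel_keep (L : List (Int × Char × Int)) (m : Int) (c : Char) (i : Int)
    (h : ∀ e ∈ L, e.1 = m → prioA e.2.1 ≤ prioA c) :
    sel L m (some (c, i)) = some (c, i) := by
  induction L with
  | nil => rfl
  | cons e rest ih =>
    obtain ⟨lv, cc, ii⟩ := e
    by_cases hl : lv = m
    · have hle : prioA cc ≤ prioA c := h (lv, cc, ii) List.mem_cons_self hl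
      simp only [sel, if_pos hl, if_neg (not_lt.mpr hle)]
      exact ih (fun e he => h e (List.mem_cons_of_mem _ he))
    · simp only [sel, if_neg hl]
      exact ih (fun e he => h e (List.mem_cons_of_mem _ he))

theorem sel_find (L : List (Int × Char × Int)) (m p : Int) (acc : Option (Char × Int))
    (h1 : ∀ e ∈ L, e.1 = m → prioA e.2.1 ≤ p)
    (h2 : ∃ e ∈ L, e.1 = m ∧ prioA e.2.1 = p)
    (h3 : acc = none ∨ ∃ c0 i0, acc = some (c0, i0) ∧ prioA c0 < p) :
    ∃ c i, sel L m acc = some (c, i) ∧ find1 L (some (m, p)) = some i := by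
  induction L generalizing acc with
  | nil => simp at h2
  | cons e rest ih =>
    obtain ⟨lv, cc, ii⟩ := e
    by_cases hl : lv = m
    · subst hl
      by_cases hp : prioA cc = p
      · have hfind : find1 ((lv, cc, ii) :: rest) (some (lv, p)) = some ii := by
          simp [find1, hp]
        have hrest : ∀ e ∈ rest, e.1 = lv → prioA e.2.1 ≤ prioA cc := by
          intro e he hel; rw [hp]; exact h1 e (List.mem_cons_of_mem _ he) hel
        refine ⟨cc, ii, ?_, hfind⟩
        rcases h3 with rfl | ⟨c0, i0, rfl, hlt⟩
        · simp only [sel]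
          exact sel_keep rest lv cc ii hrest
        · have hgt : prioA c0 < prioA cc := hp ▸ hlt
          simp only [sel, if_pos hgt]
          exact sel_keep rest lv cc ii hrest
      · have hle : prioA cc ≤ p := h1 (lv, cc, ii) List.mem_cons_self rfl
        have hlt : prioA cc < p := lt_of_le_of_ne hle hp
        have hfind : find1 ((lv, cc, ii) :: rest) (some (lv, p)) =
            find1 rest (some (lv, p)) := by
          simp [find1, hp]
        have h2a : ∃ e ∈ rest, e.1 = lv ∧ prioA e.2.1 = p := by
          rcases h2 with ⟨e, he, hel, hep⟩
          rcases List.mem_cons.mp he with rfl | hr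
          · exact absurd hep hp
          · exact ⟨e, hr, hel, hep⟩
        have h1a : ∀ e ∈ rest, e.1 = lv → prioA e.2.1 ≤ p :=
          fun e he => h1 e (List.mem_cons_of_mem _ he)
        rcases h3 with rfl | ⟨c0, i0, rfl, hlt0⟩
        · simp only [sel]
          obtain ⟨c, i, hs, hf⟩ := ih (some (cc, ii)) h1a h2a (Or.inr ⟨cc, ii, rfl, hlt⟩)
          exact ⟨c, i, hs, hfind ▸ hf⟩
        · simp only [sel]
          by_cases hgt : prioA c0 < prioA cc
          · rw [if_pos hgt]
            obtain ⟨c, i, hs, hf⟩ := ih (some (cc, ii)) h1a h2a (Or.inr ⟨cc, ii, rfl, hlt⟩)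
            exact ⟨c, i, hs, hfind ▸ hf⟩
          · rw [if_neg hgt]
            obtain ⟨c, i, hs, hf⟩ := ih (some (c0, i0)) h1a h2a (Or.inr ⟨c0, i0, rfl, hlt0⟩)
            exact ⟨c, i, hs, hfind ▸ hf⟩
    · have hfind : find1 ((lv, cc, ii) :: rest) (some (m, p)) = find1 rest (some (m, p)) := by
        simp [find1, hl]
      have h2a : ∃ e ∈ rest, e.1 = m ∧ prioA e.2.1 = p := by
        rcases h2 with ⟨e, he, hel, hep⟩
        rcases List.mem_cons.mp he with rfl | hr
        · exact absurd hel hl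
        · exact ⟨e, hr, hel, hep⟩
      obtain ⟨c, i, hs, hf⟩ := ih acc (fun e he => h1 e (List.mem_cons_of_mem _ he)) h2a h3
      exact ⟨c, i, by simpa [sel, hl] using hs, hfind ▸ hf⟩

theorem solution_eq_alt (expr : String) (hpre : Pre_solution expr) :
    solution expr = solution_alt expr := by
  have hmap : (PySem.List.enumerate expr.toList).map (·.2) = expr.toList :=
    PySem.List.map_snd_enumerate expr.toList 0
  obtain ⟨c, hc, hcmem⟩ : ∃ c, (c = '+' ∨ c = '*') ∧ c ∈ expr.toList := by
    rcases hpre with h | h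
    · exact ⟨'+', Or.inl rfl, h⟩
    · exact ⟨'*', Or.inr rfl, h⟩
  have hLne : ops (PySem.List.enumerate expr.toList) 0 ≠ [] :=
    ops_ne_nil _ 0 c hc (by rw [hmap]; exact hcmem)
  have hkeys : ∀ l, l ∈ (((PySem.List.enumerate expr.toList).foldl aStep
      (0, PySem.Dict.empty)).2).keys ↔ l ∈ (ops (PySem.List.enumerate expr.toList) 0).map (·.1) := by
    intro l
    rw [foldA_mem_keys]
    simp
  obtain ⟨e1, L1, hL1⟩ : ∃ e1 L1, ops (PySem.List.enumerate expr.toList) 0 = e1 :: L1 := by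
    rcases hLE : ops (PySem.List.enumerate expr.toList) 0 with _ | ⟨a, b⟩
    · exact absurd hLE hLne
    · exact ⟨a, b, rfl⟩
  rcases hmax : PySem.List.max? (((PySem.List.enumerate expr.toList).foldl aStep
      (0, PySem.Dict.empty)).2).keys (fun k => k) with _ | m
  · rw [PySem.List.max?_eq_none_iff] at hmax
    have hk : e1.1 ∈ (((PySem.List.enumerate expr.toList).foldl aStep
        (0, PySem.Dict.empty)).2).keys := (hkeys e1.1).mpr (by rw [hL1]; simp)
    rw [hmax] at hk
    simp at hk
  · have hm_mem : m ∈ (ops (PySem.List.enumerate expr.toList) 0).map (·.1) :=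
      (hkeys m).mp (PySem.List.max?_mem hmax)
    have hm_ub : ∀ lv ∈ (ops (PySem.List.enumerate expr.toList) 0).map (·.1), lv ≤ m := by
      intro lv hlv
      have := PySem.List.max?_isMax hmax _ ((hkeys lv).mpr hlv)
      simpa using this
    obtain ⟨⟨d0, p⟩, hbests⟩ := bests_isSome _ hLne
    obtain ⟨hmem0, hub, -⟩ := bests_spec _ none (d0, p) hbests
    rcases hmem0 with ⟨e0, he0, he0p⟩ | habs
    swap
    · exact absurd habs (by simp)
    obtain ⟨he0l, he0pr⟩ : e0.1 = d0 ∧ prioA e0.2.1 = p := Prod.mk.inj he0p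
    have hd0m : d0 = m := by
      have h1 : d0 ≤ m := hm_ub d0 (by
        rw [← he0l]
        exact List.mem_map_of_mem he0)
      obtain ⟨e2, he2, he2l⟩ : ∃ e2 ∈ ops (PySem.List.enumerate expr.toList) 0, e2.1 = m := by
        rcases List.mem_map.mp hm_mem with ⟨e2, he2, he2l⟩
        exact ⟨e2, he2, he2l⟩
      have h2 := hub e2 he2
      rw [he2l] at h2
      rcases h2 with h2 | ⟨h2, -⟩ <;> omega
    subst hd0m
    have h1 : ∀ e ∈ ops (PySem.List.enumerate expr.toList) 0, e.1 = d0 → prioA e.2.1 ≤ p := by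
      intro e he hem
      have := hub e he
      rw [hem] at this
      rcases this with h | ⟨-, h⟩ <;> omega
    have h2 : ∃ e ∈ ops (PySem.List.enumerate expr.toList) 0, e.1 = d0 ∧ prioA e.2.1 = p :=
      ⟨e0, he0, he0l, he0pr⟩
    obtain ⟨c1, i1, hsel, hfind⟩ := sel_find _ d0 p none h1 h2 (Or.inl rfl)
    have hget : (((PySem.List.enumerate expr.toList).foldl aStep
        (0, PySem.Dict.empty)).2).get? d0 = some (c1, i1) := by
      rw [foldA_get?, PySem.Dict.get?_empty]
      exact hsel
    have hbp : bestPass expr.toList 0 none = some (d0, p) := by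
      rw [← hmap, bestPass_eq_bests]
      exact hbests
    have hfp : findPass (PySem.List.enumerate expr.toList) 0 (some (d0, p)) = some i1 := by
      rw [findPass_eq_find1]
      exact hfind
    have hA : solution expr = i1 := by
      unfold solution
      dsimp only
      rw [hmax]
      dsimp only
      rw [PySem.Dict.getD_eq_get?_getD, hget]
      rfl
    have hB : solution_alt expr = i1 := by
      unfold solution_alt
      dsimp only
      rw [hbp, hfp]
    rw [hA, hB]

-- ===== VERDICT (by name: the statement is the Claim_ definition above) =====
theorem solution_spec : Claim_equal_solution := by
  unfold Claim_equal_solution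
  intro expr _ hpre
  unfold Spec_solution
  exact solution_eq_alt expr hpre
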